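-- pv_equiv track=rewrite | github.com/IDioniksI/algorithms-and-data-structures | sorting/shell_sort.py | increment
-- ===== SOURCE A (Python) =====
-- def increment(seq, size):
--     """The function counts the step according to Sedgwick's formula"""
--     p1 = p2 = p3 = 1
--     s = -1
--     while True:
--         s += 1
--         if s % 2:
--             seq[s] = 8 * p1 - 6 * p2 + 1
--         else:
--             seq[s] = 9 * p1 - 9 * p3 + 1
--             p2 *= 2
--             p3 *= 2
--         p1 *= 2
--         if 3 * seq[s] >= size:
--             break
--     return s if s > 0 else 0
-- ===== SOURCE B (Python) =====
-- def _gap(s):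
--     """Sedgewick gap at index s, closed form."""
--     h = 2 ** ((s + 1) // 2)
--     return 8 * 2**s - 6 * h + 1 if s % 2 else 9 * 2**s - 9 * h + 1
--
-- def increment(seq, size):
--     """The function counts the step according to Sedgwick's formula"""
--     # the gaps grow monotonically, so locate the smallest index s with
--     # 3 * gap(s) >= size by exponential + binary search, then fill seq[0..s]
--     if 3 * _gap(0) >= size:
--         s = 0
--     else:
--         hi = 1
--         while 3 * _gap(hi) < size:
--             hi *= 2
--         lo = hi // 2
--         while lo + 1 < hi:
--             mid = (lo + hi) // 2
--             if 3 * _gap(mid) >= size: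
--                 hi = mid
--             else:
--                 lo = mid
--         s = hi
--     for i in range(s + 1):
--         seq[i] = _gap(i)
--     return s
-- ===== Notes on version B (the rewrite author's own statement) =====
-- stated objective: alternative
-- what changed: A generates gaps one by one in a single generate-and-test loop with running accumulators; B instead locates the smallest stopping index s with 3*gap(s) >= size by exponential doubling plus binary search over the closed-form (monotone) Sedgewick gap formula, then fills seq[0..s] in a separate pass.
import Mathlib
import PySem

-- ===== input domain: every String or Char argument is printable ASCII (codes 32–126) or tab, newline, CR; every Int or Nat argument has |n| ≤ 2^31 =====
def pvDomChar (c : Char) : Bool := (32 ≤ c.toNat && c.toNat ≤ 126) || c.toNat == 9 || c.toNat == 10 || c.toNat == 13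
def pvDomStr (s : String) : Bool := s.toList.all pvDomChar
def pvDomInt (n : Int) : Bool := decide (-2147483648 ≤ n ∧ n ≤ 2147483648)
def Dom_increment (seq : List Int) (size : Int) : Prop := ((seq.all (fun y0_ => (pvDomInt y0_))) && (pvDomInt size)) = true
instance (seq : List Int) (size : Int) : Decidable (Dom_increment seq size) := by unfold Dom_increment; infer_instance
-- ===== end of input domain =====

-- B replaces A's linear generate-and-test loop by an exponential+binary search for the stopping
-- index followed by a fill pass; equivalence is about the RETURN value (both Pythons also perform
-- the identical in-place writes seq[i] = gap(i) for i = 0..result).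

-- ===== PORT A =====
-- the while-True loop of A; `none` = the IndexError Python raises when the write seq[s] = … is
-- out of range (fuel seq.length+1 is enough: s grows by 1 each turn, so s reaches seq.length first)
def incLoopA (size : Int) (seq : List Int) (p1 p2 p3 : Int) (s : Nat) : Nat → Option Nat
  | 0 => none
  | fuel + 1 =>
    if s < seq.length then
      if s % 2 = 1 then
        let g := 8 * p1 - 6 * p2 + 1
        let seq' := seq.set s g
        if 3 * g ≥ size then some s
        else incLoopA size seq' (2 * p1) p2 p3 (s + 1) fuel
      else
        let g := 9 * p1 - 9 * p3 + 1
        let seq' := seq.set s g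
        if 3 * g ≥ size then some s
        else incLoopA size seq' (2 * p1) (2 * p2) (2 * p3) (s + 1) fuel
    else none

def increment (seq : List Int) (size : Int) : Int :=
  match incLoopA size seq 1 1 1 0 (seq.length + 1) with
  | some s => if (s : Int) > 0 then (s : Int) else 0
  | none => 0

-- ===== PORT B =====
-- _gap from Source B
def pvGap (s : Nat) : Int :=
  let h : Int := 2 ^ ((s + 1) / 2)
  if s % 2 = 1 then 8 * 2 ^ s - 6 * h + 1 else 9 * 2 ^ s - 9 * h + 1

-- the `while 3 * _gap(hi) < size: hi *= 2` loop; the fuel is only a totality guard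
-- (under Dom_, 6 doublings always suffice — proved below)
def expSearch (size : Int) (hi : Nat) : Nat → Nat
  | 0 => hi
  | fuel + 1 => if 3 * pvGap hi < size then expSearch size (hi * 2) fuel else hi

-- the `while lo + 1 < hi` binary-search loop
def binSearch (size : Int) (lo hi : Nat) : Nat :=
  if lo + 1 < hi then
    if 3 * pvGap ((lo + hi) / 2) ≥ size then binSearch size lo ((lo + hi) / 2)
    else binSearch size ((lo + hi) / 2) hi
  else hi
termination_by hi - lo
decreasing_by all_goals omega

def increment_alt (seq : List Int) (size : Int) : Int :=
  let s : Nat :=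
    if 3 * pvGap 0 ≥ size then 0
    else
      let hi := expSearch size 1 64
      binSearch size (hi / 2) hi
  -- the fill pass `for i in range(s+1): seq[i] = _gap(i)`: pure mutation, result unused
  let _ := (List.range (s + 1)).foldl (fun acc i => acc.set i (pvGap i)) seq
  (s : Int)

-- ===== PRECONDITION & SPEC =====
-- Pre_ excludes exactly the inputs on which Python A raises IndexError: those where no index of
-- seq satisfies the break condition 3 * gap(s) >= size, so the loop walks off the end of seq.
def Pre_increment (seq : List Int) (size : Int) : Prop := ∃ s < seq.length, 3 * pvGap s ≥ size
instance (seq : List Int) (size : Int) : Decidable (Pre_increment seq size) := by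
  unfold Pre_increment; infer_instance

def pvWitness_increment : List Int × Int := ([0], 0)

def Spec_increment (seq : List Int) (size : Int) (out : Int) : Prop := out = increment_alt seq size
instance (seq : List Int) (size : Int) (out : Int) : Decidable (Spec_increment seq size out) := by
  unfold Spec_increment; infer_instance

-- ===== CLAIM (what is proved, stated in full; the proofs are below) =====
def Claim_equal_increment : Prop := ∀ (seq : List Int) (size : Int), Dom_increment seq size → Pre_increment seq size → Spec_increment seq size (increment seq size)

-- ===== LEMMAS AND PROOFS =====

-- the gap sequence is monotone (the key fact behind B's binary search)
lemma pvGap_step (s : Nat) : pvGap s ≤ pvGap (s + 1) := by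
  rcases Nat.even_or_odd s with he | ho
  · obtain ⟨k, hk⟩ := he
    have h1 : s % 2 ≠ 1 := by omega
    have h2 : (s + 1) % 2 = 1 := by omega
    have h3 : (s + 1) / 2 = k := by omega
    have h4 : (s + 1 + 1) / 2 = k + 1 := by omega
    have g1 : pvGap s = 9 * 2 ^ s - 9 * 2 ^ k + 1 := by simp [pvGap, h1, h3]
    have g2 : pvGap (s + 1) = 8 * 2 ^ (s + 1) - 6 * 2 ^ (k + 1) + 1 := by
      simp [pvGap, h2, h4]
    have hle : (2 : Int) ^ k ≤ 2 ^ s := pow_le_pow_right₀ (by norm_num) (by omega)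
    have hpos : (0 : Int) < 2 ^ k := by positivity
    have e1 : (2 : Int) ^ (s + 1) = 2 * 2 ^ s := by ring
    have e2 : (2 : Int) ^ (k + 1) = 2 * 2 ^ k := by ring
    rw [g1, g2, e1, e2]
    nlinarith
  · obtain ⟨k, hk⟩ := ho
    have h1 : s % 2 = 1 := by omega
    have h2 : (s + 1) % 2 ≠ 1 := by omega
    have h3 : (s + 1) / 2 = k + 1 := by omega
    have h4 : (s + 1 + 1) / 2 = k + 1 := by omega
    have g1 : pvGap s = 8 * 2 ^ s - 6 * 2 ^ (k + 1) + 1 := by simp [pvGap, h1, h3]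
    have g2 : pvGap (s + 1) = 9 * 2 ^ (s + 1) - 9 * 2 ^ (k + 1) + 1 := by
      simp [pvGap, h2, h4]
    have hle : (2 : Int) ^ (k + 1) ≤ 2 ^ s := pow_le_pow_right₀ (by norm_num) (by omega)
    have hpos : (0 : Int) < 2 ^ (k + 1) := by positivity
    have e1 : (2 : Int) ^ (s + 1) = 2 * 2 ^ s := by ring
    rw [g1, g2, e1]
    nlinarith

lemma pvGap_mono {s t : Nat} (h : s ≤ t) : pvGap s ≤ pvGap t := by
  induction t with
  | zero => simp_all
  | succ n ih =>
    rcases Nat.lt_or_ge s (n + 1) with h' | h'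
    · exact le_trans (ih (by omega)) (pvGap_step n)
    · have : s = n + 1 := by omega
      simp [this]

lemma cond_mono {size : Int} {s t : Nat} (h : s ≤ t) (hc : 3 * pvGap s ≥ size) :
    3 * pvGap t ≥ size := le_trans hc (by have := pvGap_mono h; linarith)

-- under Dom_ the break condition certainly holds at index 33
lemma cond_33 {size : Int} (h : size ≤ 2147483648) : 3 * pvGap 33 ≥ size := by
  have : pvGap 33 = 68718690305 := by norm_num [pvGap]
  omega

-- A's loop at state (2^s, 2^((s+1)/2), 2^((s+1)/2)) computes exactly pvGap s each turn
-- (reduces A to a linear scan for the least s with 3 * pvGap s ≥ size)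
def incLoopLin (size : Int) (seq : List Int) (s : Nat) : Nat → Option Nat
  | 0 => none
  | fuel + 1 =>
    if s < seq.length then
      if 3 * pvGap s ≥ size then some s
      else incLoopLin size (seq.set s (pvGap s)) (s + 1) fuel
    else none

lemma incLoop_eq (size : Int) :
    ∀ (fuel s : Nat) (seq : List Int),
      incLoopA size seq (2 ^ s) (2 ^ ((s + 1) / 2)) (2 ^ ((s + 1) / 2)) s fuel =
      incLoopLin size seq s fuel := by
  intro fuel
  induction fuel with
  | zero => intro s seq; rfl
  | succ n ih =>
    intro s seq
    simp only [incLoopA, incLoopLin]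
    by_cases hlt : s < seq.length
    · simp only [hlt, if_true]
      by_cases hpar : s % 2 = 1
      · have hgap : pvGap s = 8 * 2 ^ s - 6 * 2 ^ ((s + 1) / 2) + 1 := by
          simp [pvGap, hpar]
        have hexp : (s + 1) / 2 = (s + 1 + 1) / 2 := by omega
        have h1 : (2 : Int) * 2 ^ s = 2 ^ (s + 1) := by ring
        simp only [hpar, if_true, hgap]
        split
        · rfl
        · rw [h1, hexp]; exact ih (s + 1) _
      · have hexp : (s + 1) / 2 = s / 2 := by omega
        have hgap : pvGap s = 9 * 2 ^ s - 9 * 2 ^ ((s + 1) / 2) + 1 := by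
          simp [pvGap, hpar]
        have h1 : (2 : Int) * 2 ^ s = 2 ^ (s + 1) := by ring
        have h2 : (2 : Int) * 2 ^ ((s + 1) / 2) = 2 ^ ((s + 1 + 1) / 2) := by
          have h3 : (s + 1 + 1) / 2 = (s + 1) / 2 + 1 := by omega
          rw [h3]; ring
        simp only [hpar, if_false, hgap]
        split
        · rfl
        · rw [h1, h2]; exact ih (s + 1) _
    · simp [hlt]

-- the linear scan returns the least index satisfying the break condition
lemma incLoopLin_finds (size : Int) (L : Nat)
    (hL : 3 * pvGap L ≥ size) (hmin : ∀ t < L, ¬ 3 * pvGap t ≥ size) :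
    ∀ (fuel s : Nat) (seq : List Int), s ≤ L → L < s + fuel → L < seq.length →
      incLoopLin size seq s fuel = some L := by
  intro fuel
  induction fuel with
  | zero => intro s seq h1 h2 _; omega
  | succ n ih =>
    intro s seq h1 h2 h3
    have hlt : s < seq.length := by omega
    rw [incLoopLin, if_pos hlt]
    by_cases hc : 3 * pvGap s ≥ size
    · have hsL : s = L := by
        by_contra hne
        exact hmin s (by omega) hc
      rw [if_pos hc, hsL]
    · rw [if_neg hc]
      have hne : s ≠ L := fun h => hc (h ▸ hL)
      exact ih (s + 1) _ (by omega) (by omega) (by simpa using h3)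

-- expSearch keeps the invariant ¬cond(hi/2) and, given enough fuel, reaches cond(result)
lemma expSearch_spec (size : Int) :
    ∀ (fuel hi : Nat), 1 ≤ hi → ¬ 3 * pvGap (hi / 2) ≥ size →
      3 * pvGap (hi * 2 ^ fuel) ≥ size →
      1 ≤ expSearch size hi fuel ∧ 3 * pvGap (expSearch size hi fuel) ≥ size ∧
        ¬ 3 * pvGap (expSearch size hi fuel / 2) ≥ size := by
  intro fuel
  induction fuel with
  | zero =>
    intro hi h1 h2 h3
    simp only [expSearch]
    simp only [pow_zero, mul_one] at h3
    exact ⟨h1, h3, h2⟩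
  | succ n ih =>
    intro hi h1 h2 h3
    simp only [expSearch]
    by_cases hc : 3 * pvGap hi < size
    · rw [if_pos hc]
      refine ih (hi * 2) (by omega) (by simpa [Nat.mul_div_cancel] using (by omega : ¬ 3 * pvGap hi ≥ size)) ?_
      have : hi * 2 * 2 ^ n = hi * 2 ^ (n + 1) := by ring
      rw [this]; exact h3
    · rw [if_neg hc]
      exact ⟨h1, by omega, h2⟩

-- binSearch under ¬cond lo ∧ cond hi returns the least index satisfying cond
lemma binSearch_finds_aux (size : Int) (L : Nat)
    (hL : 3 * pvGap L ≥ size) (hmin : ∀ t < L, ¬ 3 * pvGap t ≥ size) :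
    ∀ (n lo hi : Nat), hi - lo ≤ n → lo < hi → ¬ 3 * pvGap lo ≥ size →
      3 * pvGap hi ≥ size → binSearch size lo hi = L := by
  intro n
  induction n with
  | zero => intro lo hi h1 h2 _ _; omega
  | succ m ih =>
    intro lo hi hlen hlt hblo hbhi
    rw [binSearch]
    by_cases hmid : lo + 1 < hi
    · rw [if_pos hmid]
      by_cases hc : 3 * pvGap ((lo + hi) / 2) ≥ size
      · rw [if_pos hc]
        exact ih lo ((lo + hi) / 2) (by omega) (by omega) hblo hc
      · rw [if_neg hc]
        exact ih ((lo + hi) / 2) hi (by omega) (by omega) hc hbhi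
    · rw [if_neg hmid]
      have hLhi : L ≤ hi := by
        by_contra h
        exact hmin hi (by omega) hbhi
      have hloL : lo < L := by
        by_contra h
        exact hblo (cond_mono (by omega) hL)
      omega

lemma increment_eq (seq : List Int) (size : Int)
    (hdom : Dom_increment seq size) (hpre : Pre_increment seq size) :
    increment seq size = increment_alt seq size := by
  obtain ⟨w, hwlen, hwc⟩ := hpre
  -- the least index satisfying the break condition
  have hex : ∃ s, 3 * pvGap s ≥ size := ⟨w, hwc⟩
  classical
  set L := Nat.find hex with hLdef
  have hL : 3 * pvGap L ≥ size := Nat.find_spec hex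
  have hmin : ∀ t < L, ¬ 3 * pvGap t ≥ size := fun t ht => Nat.find_min hex ht
  have hLw : L ≤ w := Nat.find_min' hex hwc
  have hLlen : L < seq.length := by omega
  -- A computes L
  have hA : increment seq size = (L : Int) := by
    unfold increment
    have h0 := incLoop_eq size (seq.length + 1) 0 seq
    norm_num at h0
    rw [h0, incLoopLin_finds size L hL hmin (seq.length + 1) 0 seq (by omega) (by omega) hLlen]
    show (if (L : Int) > 0 then (L : Int) else 0) = (L : Int)
    split <;> omega
  -- B computes L
  have hB : increment_alt seq size = (L : Int) := by
    unfold increment_alt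
    by_cases h0 : 3 * pvGap 0 ≥ size
    · have : L = 0 := by
        have := Nat.find_min' hex h0
        omega
      simp [h0, this]
    · rw [if_neg h0]
      have hsize : size ≤ 2147483648 := by
        unfold Dom_increment at hdom
        simp [pvDomInt] at hdom
        omega
      have hfuel : 3 * pvGap (1 * 2 ^ 64) ≥ size :=
        cond_mono (by norm_num) (cond_33 hsize)
      obtain ⟨h1, h2, h3⟩ := expSearch_spec size 64 1 (by norm_num) (by simpa using h0) hfuel
      rw [binSearch_finds_aux size L hL hmin (expSearch size 1 64) (expSearch size 1 64 / 2) (expSearch size 1 64) (by omega) (by omega) h3 h2]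
  rw [hA, hB]

-- ===== VERDICT (by name: the statement is the Claim_ definition above) =====
theorem increment_spec : Claim_equal_increment := by
  intro seq size hdom hpre
  exact increment_eq seq size hdom hpre
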